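-- pv_equiv track=rewrite | github.com/song248/codetree-TILs | 240610/고대 문명 유적 탐사/ancient-ruin-exploration.py | cal_score
-- ===== SOURCE A (Python) =====
-- from collections import deque
--
-- def cal_score(board):
--     score = 0
--     # 방문여부 체크
--     visit = [[False] * 5 for _ in range(5)]
--     # BFS 방향
--     dy, dx = [0, 1, 0, -1], [1, 0, -1, 0]
--
--     for i in range(5):
--         for j in range(5):
--             if not visit[i][j]:
--                 dq, trace = deque([(i, j)]), deque([(i, j)])
--                 visit[i][j] = True
--                 while dq:
--                     cur = dq.popleft()
--                     for k in range(4):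
--                         ny, nx = cur[0]+dy[k], cur[1]+dx[k]
--                         if 0<=ny<5 and 0<=nx<5 and visit[ny][nx] == False and board[ny][nx] == board[cur[0]][cur[1]]:
--                             dq.append((ny, nx))
--                             trace.append([ny, nx])
--                             visit[ny][nx] = True
--                 if len(trace) >= 3:
--                     score += len(trace)
--                     while trace:
--                         t = trace.popleft()
--                         board[t[0]][t[1]] = 0
--     return score
-- ===== SOURCE B (Python) =====
-- def cal_score(board):
--     def comp(s):
--         cells = {s}
--         while True:
--             nxt = set(cells)
--             for (y, x) in cells:
--                 for dy, dx in ((0, 1), (1, 0), (0, -1), (-1, 0)):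
--                     ny, nx2 = y + dy, x + dx
--                     if 0 <= ny < 5 and 0 <= nx2 < 5 and board[ny][nx2] == board[y][x]:
--                         nxt.add((ny, nx2))
--             if nxt == cells:
--                 return cells
--             cells = nxt
--     big = [(i, j) for i in range(5) for j in range(5) if len(comp((i, j))) >= 3]
--     for (y, x) in big:
--         board[y][x] = 0
--     return len(big)
-- ===== Notes on version B (the rewrite author's own statement) =====
-- stated objective: alternative
-- what changed: Replaces the global BFS with visited bookkeeping (queue, trace, in-flight zeroing) by a per-cell fixed-point saturation: each cell's component is computed independently as the closure of {cell} under equal-valued adjacency, and the score is the count of cells whose component has size >= 3 (equal to the sum of sizes of big components).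
import Mathlib
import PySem

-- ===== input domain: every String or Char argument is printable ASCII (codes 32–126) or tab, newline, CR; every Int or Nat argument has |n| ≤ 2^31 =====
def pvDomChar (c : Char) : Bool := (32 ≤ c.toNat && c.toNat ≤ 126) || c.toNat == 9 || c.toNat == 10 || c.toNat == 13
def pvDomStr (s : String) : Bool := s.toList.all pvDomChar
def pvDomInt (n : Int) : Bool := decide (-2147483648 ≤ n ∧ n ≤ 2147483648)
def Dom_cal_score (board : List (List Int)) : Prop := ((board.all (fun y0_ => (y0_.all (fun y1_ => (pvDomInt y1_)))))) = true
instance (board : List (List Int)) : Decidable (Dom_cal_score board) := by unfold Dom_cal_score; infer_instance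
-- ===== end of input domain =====

-- B replaces A's global BFS by an independent per-cell fixed-point closure (score = number of
-- cells in big components); both Pythons mutate `board` in place identically (zeroing scored
-- cells) — the equivalence proved here is about the RETURN value only.

-- ===== PORT A =====
-- board[y][x] / board[y][x] = z for 0 ≤ y,x < 5: exact under Pre_cal_score (indices are
-- guard-checked to be in [0,5) at every use; outside Pre_ Python raises IndexError)
def bget (board : List (List Int)) (y x : Int) : Int :=
  (board.getD y.toNat []).getD x.toNat 0

def bset (board : List (List Int)) (y x : Int) (z : Int) : List (List Int) :=
  board.set y.toNat ((board.getD y.toNat []).set x.toNat z)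

def vget (v : List (List Bool)) (y x : Int) : Bool :=
  (v.getD y.toNat []).getD x.toNat false

def vset (v : List (List Bool)) (y x : Int) (b : Bool) : List (List Bool) :=
  v.set y.toNat ((v.getD y.toNat []).set x.toNat b)

-- dy, dx = [0, 1, 0, -1], [1, 0, -1, 0], traversed together by `for k in range(4)`
def dirsA : List (Int × Int) := [(0, 1), (1, 0), (0, -1), (-1, 0)]

-- one neighbour check of the inner `for k in range(4)`; state (visit, dq, trace)
def dirStep (bd : List (List Int)) (cur : Int × Int)
    (st : List (List Bool) × List (Int × Int) × List (Int × Int)) (d : Int × Int) :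
    List (List Bool) × List (Int × Int) × List (Int × Int) :=
  let ny := cur.1 + d.1
  let nx := cur.2 + d.2
  if 0 ≤ ny ∧ ny < 5 ∧ 0 ≤ nx ∧ nx < 5 ∧ vget st.1 ny nx = false ∧
      bget bd ny nx = bget bd cur.1 cur.2 then
    (vset st.1 ny nx true, st.2.1 ++ [(ny, nx)], st.2.2 ++ [(ny, nx)])
  else st

-- `while dq:` — fuel only makes the loop total (≤ 25 cells can ever be enqueued, so 32 is
-- never exhausted; the proof shows the fuel branch is unreachable)
def bfs (bd : List (List Int)) :
    Nat → List (List Bool) × List (Int × Int) × List (Int × Int) →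
    List (List Bool) × List (Int × Int)
  | 0, (v, _, tr) => (v, tr)
  | f + 1, (v, dq, tr) =>
    match dq with
    | [] => (v, tr)
    | cur :: rest => bfs bd f (dirsA.foldl (dirStep bd cur) (v, rest, tr))

-- body of the double `for i / for j` loop; state (visit, score, board)
def processCell (st : List (List Bool) × Int × List (List Int)) (i j : Int) :
    List (List Bool) × Int × List (List Int) :=
  if vget st.1 i j = false then
    let v1 := vset st.1 i j true
    let r := bfs st.2.2 32 (v1, [(i, j)], [(i, j)])
    if 3 ≤ r.2.length then
      (r.1, st.2.1 + (r.2.length : Int), r.2.foldl (fun bd t => bset bd t.1 t.2 0) st.2.2)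
    else (r.1, st.2.1, st.2.2)
  else st

def cal_score (board : List (List Int)) : Int :=
  let init := (List.replicate 5 (List.replicate 5 false), (0 : Int), board)
  ((List.range 5).foldl (fun st i =>
      (List.range 5).foldl (fun st j => processCell st (i : Int) (j : Int)) st) init).2.1

-- ===== PORT B =====
def dirsB : List (Int × Int) := [(0, 1), (1, 0), (0, -1), (-1, 0)]

-- one saturation round: nxt = set(cells), then add every in-bounds equal-valued neighbour
-- the body of comp's inner double loop: maybe add the neighbour p + d of p to nxt
def ccAdd (bd : List (List Int)) (p : Int × Int) (nxt : PySem.Set (Int × Int)) (d : Int × Int) :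
    PySem.Set (Int × Int) :=
  let ny := p.1 + d.1
  let nx := p.2 + d.2
  if 0 ≤ ny ∧ ny < 5 ∧ 0 ≤ nx ∧ nx < 5 ∧ bget bd ny nx = bget bd p.1 p.2 then
    PySem.Set.add nxt (ny, nx)
  else nxt

def ccStep (bd : List (List Int)) (cells : PySem.Set (Int × Int)) : PySem.Set (Int × Int) :=
  cells.foldl (fun nxt p => dirsB.foldl (ccAdd bd p) nxt) cells

-- `while True:` of comp — fuel only makes the loop total (the set grows strictly inside a
-- 25-cell grid, so 32 rounds are never exhausted; the proof shows the fuel branch is unreachable)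
def ccLoop (bd : List (List Int)) : Nat → PySem.Set (Int × Int) → PySem.Set (Int × Int)
  | 0, cells => cells
  | f + 1, cells =>
    let nxt := ccStep bd cells
    if PySem.Set.equal nxt cells then cells else ccLoop bd f nxt

-- comp(s): the component of s as a Python set
def compB (bd : List (List Int)) (s : Int × Int) : PySem.Set (Int × Int) :=
  ccLoop bd 32 (PySem.Set.ofList [s])

-- the (i, j) pairs produced by `for i in range(5) for j in range(5)`
def cells5 : List (Int × Int) :=
  (List.range 5).flatMap fun i => (List.range 5).map fun j => ((i : Int), (j : Int))

def cal_score_alt (board : List (List Int)) : Int :=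
  let big := cells5.filter fun p => decide (3 ≤ (compB board p).length)
  -- Source B then zeroes board[y][x] for (y, x) in big — an in-place mutation of the argument
  -- that the returned value does not depend on
  (big.length : Int)

-- ===== PRECONDITION & SPEC =====
-- Pre_: the Python A indexes board[y][x] for all 0 ≤ y,x < 5, so it raises IndexError unless
-- the board has at least 5 rows whose first 5 rows each have at least 5 entries.
def Pre_cal_score (board : List (List Int)) : Prop :=
  5 ≤ board.length ∧ ∀ r ∈ board.take 5, 5 ≤ r.length
instance (board : List (List Int)) : Decidable (Pre_cal_score board) := by
  unfold Pre_cal_score; infer_instance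

def pvWitness_cal_score : List (List Int) :=
  [[1, 1, 1, 0, 0], [0, 0, 0, 0, 0], [0, 0, 2, 2, 0], [0, 0, 2, 0, 0], [0, 0, 2, 3, 3]]

def Spec_cal_score (board : List (List Int)) (out : Int) : Prop := out = cal_score_alt board
instance (board : List (List Int)) (out : Int) : Decidable (Spec_cal_score board out) := by
  unfold Spec_cal_score; infer_instance

-- ===== CLAIM (what is proved, stated in full; the proofs are below) =====
def Claim_equal_cal_score : Prop := ∀ (board : List (List Int)), Dom_cal_score board →
  Pre_cal_score board → Spec_cal_score board (cal_score board)

-- ===== LEMMAS AND PROOFS =====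

-- ---------- geometry ----------
def grid : Finset (Int × Int) := ({0, 1, 2, 3, 4} : Finset Int) ×ˢ ({0, 1, 2, 3, 4} : Finset Int)

lemma mem_grid {p : Int × Int} : p ∈ grid ↔ 0 ≤ p.1 ∧ p.1 < 5 ∧ 0 ≤ p.2 ∧ p.2 < 5 := by
  simp only [grid, Finset.mem_product, Finset.mem_insert, Finset.mem_singleton]
  omega

-- equal-valued grid adjacency on the ORIGINAL board b
def estep (b : List (List Int)) (p q : Int × Int) : Prop :=
  p ∈ grid ∧ q ∈ grid ∧ (∃ d ∈ dirsA, q = (p.1 + d.1, p.2 + d.2)) ∧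
    bget b q.1 q.2 = bget b p.1 p.2

def Reach (b : List (List Int)) (p q : Int × Int) : Prop := Relation.ReflTransGen (estep b) p q

lemma estep_symm {b : List (List Int)} {p q : Int × Int} (h : estep b p q) : estep b q p := by
  obtain ⟨hp, hq, ⟨d, hd, rfl⟩, hv⟩ := h
  refine ⟨hq, hp, ?_, hv.symm⟩
  simp only [dirsA, List.mem_cons, List.not_mem_nil, or_false] at hd
  rcases hd with rfl | rfl | rfl | rfl
  · exact ⟨(0, -1), by simp [dirsA], by cases p; simp⟩
  · exact ⟨(-1, 0), by simp [dirsA], by cases p; simp⟩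
  · exact ⟨(0, 1), by simp [dirsA], by cases p; simp⟩
  · exact ⟨(1, 0), by simp [dirsA], by cases p; simp⟩

lemma reach_symm {b : List (List Int)} {p q : Int × Int} (h : Reach b p q) : Reach b q p := by
  induction h with
  | refl => exact Relation.ReflTransGen.refl
  | tail _ h2 ih => exact Relation.ReflTransGen.head (estep_symm h2) ih

lemma reach_grid {b : List (List Int)} {p q : Int × Int} (h : Reach b p q) (hp : p ∈ grid) :
    q ∈ grid := by
  induction h with
  | refl => exact hp
  | tail _ h2 _ => exact h2.2.1

-- ---------- cell-array accessors ----------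
def vshape (v : List (List Bool)) : Prop := v.length = 5 ∧ ∀ r ∈ v, r.length = 5

lemma vshape_vset {v : List (List Bool)} (h : vshape v) (y x : Int) (c : Bool) :
    vshape (vset v y x c) := by
  obtain ⟨h1, h2⟩ := h
  refine ⟨by simp [vset, h1], ?_⟩
  intro r hr
  by_cases hy : y.toNat < v.length
  · rcases List.mem_or_eq_of_mem_set hr with hm | rfl
    · exact h2 r hm
    · rw [List.length_set, List.getD_eq_getElem?_getD, List.getElem?_eq_getElem hy]
      exact h2 _ (List.getElem_mem hy)
  · rw [vset, List.set_eq_of_length_le (by omega)] at hr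
    exact h2 r hr

lemma vget_vset_self {v : List (List Bool)} (h : vshape v) {p : Int × Int} (hp : p ∈ grid)
    (c : Bool) : vget (vset v p.1 p.2 c) p.1 p.2 = c := by
  rw [mem_grid] at hp
  obtain ⟨h1, h2⟩ := h
  have hy : p.1.toNat < v.length := by omega
  have hrow : (v[p.1.toNat]?.getD []).length = 5 := by
    rw [List.getElem?_eq_getElem hy]
    exact h2 _ (List.getElem_mem hy)
  simp only [vget, vset, List.getD_eq_getElem?_getD]
  rw [List.getElem?_set_self hy, Option.getD_some, List.getElem?_set_self (by omega),
    Option.getD_some]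

lemma vget_vset_ne {v : List (List Bool)} {p q : Int × Int} (hp : p ∈ grid) (hq : q ∈ grid)
    (hne : q ≠ p) (c : Bool) : vget (vset v p.1 p.2 c) q.1 q.2 = vget v q.1 q.2 := by
  rw [mem_grid] at hp hq
  simp only [vget, vset, List.getD_eq_getElem?_getD]
  by_cases h1 : p.1.toNat = q.1.toNat
  · have hpq1 : p.1 = q.1 := by omega
    have h2 : p.2.toNat ≠ q.2.toNat := by
      have : p.2 ≠ q.2 := fun hc => hne (Prod.ext hpq1.symm hc.symm)
      omega
    rw [h1, List.getElem?_set]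
    split_ifs with h3 h4
    · rw [Option.getD_some, List.getElem?_set_ne h2]
    · have hnone : v[q.1.toNat]? = none := by rw [List.getElem?_eq_none_iff]; omega
      rw [Option.getD_none, hnone, Option.getD_none]
    · exact absurd rfl h3
  · rw [List.getElem?_set_ne h1]

lemma bget_bset_ne {bd : List (List Int)} {p q : Int × Int} (hp : p ∈ grid) (hq : q ∈ grid)
    (hne : q ≠ p) (z : Int) : bget (bset bd p.1 p.2 z) q.1 q.2 = bget bd q.1 q.2 := by
  rw [mem_grid] at hp hq
  simp only [bget, bset, List.getD_eq_getElem?_getD]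
  by_cases h1 : p.1.toNat = q.1.toNat
  · have hpq1 : p.1 = q.1 := by omega
    have h2 : p.2.toNat ≠ q.2.toNat := by
      have : p.2 ≠ q.2 := fun hc => hne (Prod.ext hpq1.symm hc.symm)
      omega
    rw [h1, List.getElem?_set]
    split_ifs with h3 h4
    · rw [Option.getD_some, List.getElem?_set_ne h2]
    · have hnone : bd[q.1.toNat]? = none := by rw [List.getElem?_eq_none_iff]; omega
      rw [Option.getD_none, hnone, Option.getD_none]
    · exact absurd rfl h3
  · rw [List.getElem?_set_ne h1]

lemma vget_replicate (y x : Int) :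
    vget (List.replicate 5 (List.replicate 5 false)) y x = false := by
  rw [vget]
  by_cases hy : y.toNat < 5
  · rw [List.getD_replicate _ hy]
    by_cases hx : x.toNat < 5
    · rw [List.getD_replicate _ hx]
    · have : (List.replicate 5 false).getD x.toNat false = false := by
        rw [List.getD_eq_getElem?_getD, List.getElem?_eq_none (by simp; omega)]
        rfl
      exact this
  · have hrow : (List.replicate 5 (List.replicate 5 false)).getD y.toNat [] = [] := by
      rw [List.getD_eq_getElem?_getD, List.getElem?_eq_none (by simp; omega)]
      rfl
    rw [hrow]
    rfl

-- ---------- B side: the saturation computes reachability ----------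
-- the guard of ccAdd / dirStep, as a predicate
def nbr (bd : List (List Int)) (p d : Int × Int) : Prop :=
  0 ≤ p.1 + d.1 ∧ p.1 + d.1 < 5 ∧ 0 ≤ p.2 + d.2 ∧ p.2 + d.2 < 5 ∧
    bget bd (p.1 + d.1) (p.2 + d.2) = bget bd p.1 p.2

lemma estep_iff_nbr {b : List (List Int)} {p q : Int × Int} (hp : p ∈ grid) :
    estep b p q ↔ ∃ d ∈ dirsA, nbr b p d ∧ q = (p.1 + d.1, p.2 + d.2) := by
  constructor
  · rintro ⟨-, hq, ⟨d, hd, rfl⟩, hv⟩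
    rw [mem_grid] at hq
    exact ⟨d, hd, ⟨hq.1, hq.2.1, hq.2.2.1, hq.2.2.2, hv⟩, rfl⟩
  · rintro ⟨d, hd, ⟨h1, h2, h3, h4, h5⟩, rfl⟩
    exact ⟨hp, mem_grid.mpr ⟨h1, h2, h3, h4⟩, ⟨d, hd, rfl⟩, h5⟩

lemma mem_ccAdd {bd : List (List Int)} {p : Int × Int} {nxt : PySem.Set (Int × Int)}
    {d q : Int × Int} :
    q ∈ ccAdd bd p nxt d ↔ q ∈ nxt ∨ (nbr bd p d ∧ q = (p.1 + d.1, p.2 + d.2)) := by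
  simp only [ccAdd, nbr]
  split_ifs with h
  · rw [PySem.Set.mem_add]; tauto
  · tauto

lemma nodup_ccAdd {bd : List (List Int)} {p : Int × Int} {nxt : PySem.Set (Int × Int)}
    {d : Int × Int} (h : nxt.Nodup) : (ccAdd bd p nxt d).Nodup := by
  simp only [ccAdd]
  split_ifs
  · exact PySem.Set.nodup_add _ _ h
  · exact h

lemma mem_foldl_ccAdd {bd : List (List Int)} {p : Int × Int} (ds : List (Int × Int))
    {nxt : PySem.Set (Int × Int)} {q : Int × Int} :
    q ∈ ds.foldl (ccAdd bd p) nxt ↔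
      q ∈ nxt ∨ ∃ d ∈ ds, nbr bd p d ∧ q = (p.1 + d.1, p.2 + d.2) := by
  induction ds generalizing nxt with
  | nil => simp
  | cons d ds ih => rw [List.foldl_cons, ih]; rw [mem_ccAdd]; simp; tauto

lemma nodup_foldl_ccAdd {bd : List (List Int)} {p : Int × Int} (ds : List (Int × Int))
    {nxt : PySem.Set (Int × Int)} (h : nxt.Nodup) : (ds.foldl (ccAdd bd p) nxt).Nodup := by
  induction ds generalizing nxt with
  | nil => exact h
  | cons d ds ih => exact ih (nodup_ccAdd h)

lemma dirsB_eq : dirsB = dirsA := rfl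

lemma mem_ccStep {bd : List (List Int)} {cells : PySem.Set (Int × Int)} {q : Int × Int} :
    q ∈ ccStep bd cells ↔
      q ∈ cells ∨ ∃ p ∈ cells, ∃ d ∈ dirsA, nbr bd p d ∧ q = (p.1 + d.1, p.2 + d.2) := by
  rw [← dirsB_eq]
  have key : ∀ (l acc : List (Int × Int)),
      q ∈ l.foldl (fun nxt p => dirsB.foldl (ccAdd bd p) nxt) acc ↔
        q ∈ acc ∨ ∃ p ∈ l, ∃ d ∈ dirsB, nbr bd p d ∧ q = (p.1 + d.1, p.2 + d.2) := by
    intro l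
    induction l with
    | nil => simp
    | cons p l ih =>
      intro acc
      rw [List.foldl_cons, ih, mem_foldl_ccAdd]
      simp only [List.mem_cons]
      constructor
      · rintro (((h | ⟨d, hd, hn, rfl⟩) | ⟨p', hp', d, hd, hn, rfl⟩))
        · exact Or.inl h
        · exact Or.inr ⟨p, Or.inl rfl, d, hd, hn, rfl⟩
        · exact Or.inr ⟨p', Or.inr hp', d, hd, hn, rfl⟩
      · rintro (h | ⟨p', hp' | hp', d, hd, hn, rfl⟩)
        · exact Or.inl (Or.inl h)
        · subst hp'; exact Or.inl (Or.inr ⟨d, hd, hn, rfl⟩)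
        · exact Or.inr ⟨p', hp', d, hd, hn, rfl⟩
  exact key cells cells

lemma nodup_ccStep {bd : List (List Int)} {cells : PySem.Set (Int × Int)} (h : cells.Nodup) :
    (ccStep bd cells).Nodup := by
  have key : ∀ (l acc : List (Int × Int)), acc.Nodup →
      (l.foldl (fun nxt p => dirsB.foldl (ccAdd bd p) nxt) acc).Nodup := by
    intro l
    induction l with
    | nil => exact fun acc h => h
    | cons p l ih => exact fun acc hacc => ih _ (nodup_foldl_ccAdd _ hacc)
  exact key cells cells h

lemma grid_card : grid.card = 25 := by decide

lemma length_le_25 {l : List (Int × Int)} (hn : l.Nodup) (hg : ∀ p ∈ l, p ∈ grid) :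
    l.length ≤ 25 := by
  rw [← List.toFinset_card_of_nodup hn, ← grid_card]
  exact Finset.card_le_card fun x hx => hg x (List.mem_toFinset.mp hx)

lemma ccLoop_spec (b : List (List Int)) (s : Int × Int) :
    ∀ (f : Nat) (cells : PySem.Set (Int × Int)), cells.Nodup → (∀ p ∈ cells, p ∈ grid) →
    (∀ p ∈ cells, Reach b s p) → s ∈ cells → 26 ≤ f + cells.length →
    (ccLoop b f cells).Nodup ∧ (∀ p ∈ ccLoop b f cells, p ∈ grid) ∧
      (∀ p ∈ ccLoop b f cells, Reach b s p) ∧ s ∈ ccLoop b f cells ∧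
      (∀ p ∈ ccLoop b f cells, ∀ q, estep b p q → q ∈ ccLoop b f cells) := by
  intro f
  induction f with
  | zero =>
    intro cells hn hg _ _ hf
    exact absurd (length_le_25 hn hg) (by omega)
  | succ f ih =>
    intro cells hn hg hr hs hf
    have hsub : ∀ p ∈ cells, p ∈ ccStep b cells := fun p hp => mem_ccStep.mpr (Or.inl hp)
    have hg' : ∀ p ∈ ccStep b cells, p ∈ grid := by
      intro p hp
      rcases mem_ccStep.mp hp with h | ⟨p', _, d, _, hn', rfl⟩
      · exact hg p h
      · exact mem_grid.mpr ⟨hn'.1, hn'.2.1, hn'.2.2.1, hn'.2.2.2.1⟩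
    have hr' : ∀ p ∈ ccStep b cells, Reach b s p := by
      intro p hp
      rcases mem_ccStep.mp hp with h | ⟨p', hp', d, hd, hn', rfl⟩
      · exact hr p h
      · exact Relation.ReflTransGen.tail (hr p' hp')
          ((estep_iff_nbr (hg p' hp')).mpr ⟨d, hd, hn', rfl⟩)
    rw [ccLoop]
    by_cases heq : PySem.Set.equal (ccStep b cells) cells = true
    · rw [if_pos heq]
      have hmem := (PySem.Set.equal_iff _ _).mp heq
      refine ⟨hn, hg, hr, hs, ?_⟩
      intro p hp q hq
      rcases (estep_iff_nbr (hg p hp)).mp hq with ⟨d, hd, hn', rfl⟩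
      exact (hmem _).mp (mem_ccStep.mpr (Or.inr ⟨p, hp, d, hd, hn', rfl⟩))
    · rw [if_neg heq]
      have hlen : cells.length < (ccStep b cells).length := by
        have hne : ∃ x, x ∈ ccStep b cells ∧ x ∉ cells := by
          by_contra hco
          push Not at hco
          exact heq ((PySem.Set.equal_iff _ _).mpr fun x => ⟨fun h => hco x h, hsub x⟩)
        obtain ⟨x, hx1, hx2⟩ := hne
        have hss : cells.toFinset ⊂ (ccStep b cells).toFinset := by
          constructor
          · intro y hy
            exact List.mem_toFinset.mpr (hsub y (List.mem_toFinset.mp hy))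
          · intro hcon
            exact hx2 (List.mem_toFinset.mp (hcon (List.mem_toFinset.mpr hx1)))
        have := Finset.card_lt_card hss
        rwa [List.toFinset_card_of_nodup hn, List.toFinset_card_of_nodup (nodup_ccStep hn)]
          at this
      exact ih (ccStep b cells) (nodup_ccStep hn) hg' hr' (hsub s hs) (by omega)

lemma compB_spec {b : List (List Int)} {s : Int × Int} (hs : s ∈ grid) :
    (compB b s).Nodup ∧ (∀ q, q ∈ compB b s ↔ Reach b s q) := by
  have hofl : PySem.Set.ofList [s] = [s] := PySem.Set.ofList_eq_self_of_nodup _ (by simp)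
  have h := ccLoop_spec b s 32 (PySem.Set.ofList [s]) (by rw [hofl]; simp)
    (by rw [hofl]; simpa using hs)
    (by rw [hofl]; intro p hp; rw [List.mem_singleton] at hp; subst hp
        exact Relation.ReflTransGen.refl)
    (by rw [hofl]; simp) (by rw [hofl]; simp)
  obtain ⟨h1, h2, h3, h4, h5⟩ := h
  refine ⟨h1, fun q => ⟨fun hq => h3 q hq, fun hq => ?_⟩⟩
  induction hq with
  | refl => exact h4
  | tail _ h7 ih => exact h5 _ ih _ h7

lemma compB_length_eq {b : List (List Int)} {s q : Int × Int} (hs : s ∈ grid)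
    (h : Reach b s q) : (compB b q).length = (compB b s).length := by
  have hq : q ∈ grid := reach_grid h hs
  have h1 := compB_spec (b := b) hs
  have h2 := compB_spec (b := b) hq
  have : List.Perm (compB b q) (compB b s) := by
    rw [List.perm_ext_iff_of_nodup h2.1 h1.1]
    intro a
    rw [h1.2, h2.2]
    constructor
    · exact fun hr => h.trans hr
    · exact fun hr => (reach_symm h).trans hr
  exact this.length_eq

-- ---------- A side: BFS invariant ----------
-- context of one BFS run: V₀ = already-visited cells, bd = current (partly zeroed) board
def BfsCtx (b bd : List (List Int)) (V₀ : Finset (Int × Int)) : Prop :=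
  V₀ ⊆ grid ∧ (∀ p ∈ grid, p ∉ V₀ → bget bd p.1 p.2 = bget b p.1 p.2) ∧
    (∀ p ∈ V₀, ∀ q, estep b p q → q ∈ V₀)

def BfsInv (b : List (List Int)) (V₀ : Finset (Int × Int)) (s : Int × Int)
    (v : List (List Bool)) (dq tr : List (Int × Int)) : Prop :=
  vshape v ∧ tr.Nodup ∧ dq.Nodup ∧ (∀ p ∈ tr, p ∈ grid) ∧ (∀ p ∈ tr, p ∉ V₀) ∧
    (∀ p ∈ dq, p ∈ tr) ∧ (∀ p ∈ grid, (vget v p.1 p.2 = true ↔ p ∈ V₀ ∨ p ∈ tr)) ∧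
    (∀ p ∈ tr, Reach b s p) ∧ s ∈ tr ∧
    (∀ p ∈ tr, p ∉ dq → ∀ q, estep b p q → q ∈ tr)

lemma fold_dirStep_spec {b bd : List (List Int)} {V₀ : Finset (Int × Int)} {s cur : Int × Int}
    (hctx : BfsCtx b bd V₀) :
    ∀ (ds : List (Int × Int)), ds ⊆ dirsA →
      ∀ (v : List (List Bool)) (rest tr : List (Int × Int)), cur ∈ tr →
      BfsInv b V₀ s v (cur :: rest) tr →
      ∃ Δ, (ds.foldl (dirStep bd cur) (v, rest, tr)).2.1 = rest ++ Δ ∧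
        (ds.foldl (dirStep bd cur) (v, rest, tr)).2.2 = tr ++ Δ ∧
        BfsInv b V₀ s (ds.foldl (dirStep bd cur) (v, rest, tr)).1 (cur :: (rest ++ Δ)) (tr ++ Δ) ∧
        (∀ d ∈ ds, estep b cur (cur.1 + d.1, cur.2 + d.2) →
          (cur.1 + d.1, cur.2 + d.2) ∈ tr ++ Δ) := by
  obtain ⟨hV₀g, hagree, hV₀cl⟩ := hctx
  intro ds
  induction ds with
  | nil =>
    intro _ v rest tr hcur hinv
    exact ⟨[], by simp, by simp, by simpa using hinv, by simp⟩
  | cons d ds ih =>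
    intro hds v rest tr hcur hinv
    have hd : d ∈ dirsA := hds (by simp)
    have hds' : ds ⊆ dirsA := fun x hx => hds (by simp [hx])
    obtain ⟨hsh, hndtr, hnddq, hgtr, hdisj, hdqtr, hvchar, hreach, hstr, hclosed⟩ := hinv
    have hcurg : cur ∈ grid := hgtr cur hcur
    have hcurV : cur ∉ V₀ := hdisj cur hcur
    have hbdcur : bget bd cur.1 cur.2 = bget b cur.1 cur.2 := hagree cur hcurg hcurV
    rw [List.foldl_cons]
    by_cases hc : 0 ≤ cur.1 + d.1 ∧ cur.1 + d.1 < 5 ∧ 0 ≤ cur.2 + d.2 ∧ cur.2 + d.2 < 5 ∧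
        vget v (cur.1 + d.1) (cur.2 + d.2) = false ∧
        bget bd (cur.1 + d.1) (cur.2 + d.2) = bget bd cur.1 cur.2
    · set q : Int × Int := (cur.1 + d.1, cur.2 + d.2) with hqdef
      have hstep : dirStep bd cur (v, rest, tr) d =
          (vset v q.1 q.2 true, rest ++ [q], tr ++ [q]) := by
        simp only [dirStep]
        rw [if_pos hc]
      have hqg : q ∈ grid := mem_grid.mpr ⟨hc.1, hc.2.1, hc.2.2.1, hc.2.2.2.1⟩
      have hqnot : ¬(q ∈ V₀ ∨ q ∈ tr) := by
        intro hmem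
        have := (hvchar q hqg).mpr hmem
        rw [hc.2.2.2.2.1] at this
        exact Bool.false_ne_true this
      have hqV₀ : q ∉ V₀ := fun h => hqnot (Or.inl h)
      have hqtr : q ∉ tr := fun h => hqnot (Or.inr h)
      have hes : estep b cur q := by
        refine ⟨hcurg, hqg, ⟨d, hd, rfl⟩, ?_⟩
        rw [← hagree q hqg hqV₀, ← hbdcur]
        exact hc.2.2.2.2.2
      have hcurq : cur ≠ q := fun h => hqtr (h ▸ hcur)
      have hinv' : BfsInv b V₀ s (vset v q.1 q.2 true) (cur :: (rest ++ [q])) (tr ++ [q]) := by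
        refine ⟨vshape_vset hsh _ _ _, ?_, ?_, ?_, ?_, ?_, ?_, ?_, ?_, ?_⟩
        · rw [List.nodup_append]
          refine ⟨hndtr, List.nodup_singleton q, ?_⟩
          intro a ha b2 hb
          rw [List.mem_singleton] at hb
          subst hb
          exact fun he => hqtr (he ▸ ha)
        · have hcr := List.nodup_cons.mp hnddq
          rw [List.nodup_cons]
          constructor
          · intro hmem
            rcases List.mem_append.mp hmem with h | h
            · exact hcr.1 h
            · rw [List.mem_singleton] at h
              exact hcurq h
          · rw [List.nodup_append]
            refine ⟨hcr.2, List.nodup_singleton q, ?_⟩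
            intro a ha b2 hb
            rw [List.mem_singleton] at hb
            subst hb
            exact fun he => hqtr (he ▸ hdqtr a (List.mem_cons.mpr (Or.inr ha)))
        · intro p hp
          rcases List.mem_append.mp hp with h | h
          · exact hgtr p h
          · rw [List.mem_singleton] at h; exact h ▸ hqg
        · intro p hp
          rcases List.mem_append.mp hp with h | h
          · exact hdisj p h
          · rw [List.mem_singleton] at h; exact h ▸ hqV₀
        · intro p hp
          rcases List.mem_cons.mp hp with rfl | hp'
          · exact List.mem_append.mpr (Or.inl hcur)
          · rcases List.mem_append.mp hp' with h | h
            · exact List.mem_append.mpr (Or.inl (hdqtr p (List.mem_cons.mpr (Or.inr h))))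
            · exact List.mem_append.mpr (Or.inr h)
        · intro x hx
          by_cases hxq : x = q
          · subst hxq
            rw [vget_vset_self hsh hqg]
            simp
          · rw [vget_vset_ne hqg hx hxq, hvchar x hx]
            simp only [List.mem_append, List.mem_singleton]
            constructor
            · rintro (h | h); exacts [Or.inl h, Or.inr (Or.inl h)]
            · rintro (h | h | h); exacts [Or.inl h, Or.inr h, absurd h hxq]
        · intro p hp
          rcases List.mem_append.mp hp with h | h
          · exact hreach p h
          · rw [List.mem_singleton] at h
            exact h ▸ Relation.ReflTransGen.tail (hreach cur hcur) hes
        · exact List.mem_append.mpr (Or.inl hstr)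
        · intro p hp hpdq q' hq'
          rcases List.mem_append.mp hp with h | h
          · have : p ∉ cur :: rest := by
              intro hmem
              rcases List.mem_cons.mp hmem with rfl | hmem'
              · exact hpdq (List.mem_cons.mpr (Or.inl rfl))
              · exact hpdq (List.mem_cons.mpr (Or.inr (List.mem_append.mpr (Or.inl hmem'))))
            exact List.mem_append.mpr (Or.inl (hclosed p h this q' hq'))
          · rw [List.mem_singleton] at h
            exfalso
            exact hpdq (List.mem_cons.mpr (Or.inr (List.mem_append.mpr (Or.inr (h ▸ List.mem_singleton.mpr rfl)))))
      have hcur' : cur ∈ tr ++ [q] := List.mem_append.mpr (Or.inl hcur)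
      obtain ⟨Δ', e1, e2, hinv'', hdirs⟩ := ih hds' (vset v q.1 q.2 true) (rest ++ [q]) (tr ++ [q]) hcur' hinv'
      refine ⟨q :: Δ', ?_, ?_, ?_, ?_⟩
      · rw [hstep, e1, List.append_assoc]; rfl
      · rw [hstep, e2, List.append_assoc]; rfl
      · rw [hstep]
        have ha : (rest ++ [q]) ++ Δ' = rest ++ (q :: Δ') := by
          rw [List.append_assoc]; rfl
        have hb2 : (tr ++ [q]) ++ Δ' = tr ++ (q :: Δ') := by
          rw [List.append_assoc]; rfl
        rw [← ha, ← hb2]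
        exact hinv''
      · intro d' hd' hes'
        rcases List.mem_cons.mp hd' with rfl | hd''
        · exact List.mem_append.mpr (Or.inr (List.mem_cons.mpr (Or.inl rfl)))
        · have := hdirs d' hd'' hes'
          rw [List.append_assoc] at this
          exact this
    · have hstep : dirStep bd cur (v, rest, tr) d = (v, rest, tr) := by
        simp only [dirStep]
        rw [if_neg hc]
      rw [hstep]
      obtain ⟨Δ', e1, e2, hinv'', hdirs⟩ := ih hds' v rest tr hcur
        ⟨hsh, hndtr, hnddq, hgtr, hdisj, hdqtr, hvchar, hreach, hstr, hclosed⟩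
      refine ⟨Δ', e1, e2, hinv'', ?_⟩
      intro d' hd' hes'
      rcases List.mem_cons.mp hd' with rfl | hd''
      · -- the guard failed: since estep holds on b, the only failing conjunct is the visit test
        obtain ⟨-, hqg, -, hval⟩ := id hes'
        rw [mem_grid] at hqg
        have hqV₀ : (cur.1 + d'.1, cur.2 + d'.2) ∉ V₀ := by
          intro hmem
          exact hcurV (hV₀cl _ hmem cur (estep_symm hes'))
        have hvq : vget v (cur.1 + d'.1) (cur.2 + d'.2) = true := by
          by_contra hvf
          rw [Bool.not_eq_true] at hvf
          apply hc
          refine ⟨hqg.1, hqg.2.1, hqg.2.2.1, hqg.2.2.2, hvf, ?_⟩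
          rw [hagree _ (mem_grid.mpr hqg) hqV₀, hbdcur]
          exact hval
        have := (hvchar _ (mem_grid.mpr hqg)).mp hvq
        rcases this with h | h
        · exact absurd h hqV₀
        · exact List.mem_append.mpr (Or.inl h)
      · exact hdirs d' hd'' hes'

lemma card_bound {b : List (List Int)} {V₀ : Finset (Int × Int)} {s : Int × Int}
    {v : List (List Bool)} {dq tr : List (Int × Int)} (hV : V₀ ⊆ grid)
    (h : BfsInv b V₀ s v dq tr) : V₀.card + tr.length ≤ 25 := by
  obtain ⟨-, hnd, -, hg, hdisj, -⟩ := h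
  have hdis : Disjoint V₀ tr.toFinset := by
    rw [Finset.disjoint_right]
    intro a ha
    exact hdisj a (List.mem_toFinset.mp ha)
  have h1 : V₀.card + tr.length = (V₀ ∪ tr.toFinset).card := by
    rw [Finset.card_union_of_disjoint hdis, List.toFinset_card_of_nodup hnd]
  rw [h1, ← grid_card]
  apply Finset.card_le_card
  intro x hx
  rcases Finset.mem_union.mp hx with h | h
  · exact hV h
  · exact hg x (List.mem_toFinset.mp h)

lemma bfs_spec {b bd : List (List Int)} {V₀ : Finset (Int × Int)} {s : Int × Int}
    (hctx : BfsCtx b bd V₀) :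
    ∀ (f : Nat) (v : List (List Bool)) (dq tr : List (Int × Int)),
      BfsInv b V₀ s v dq tr → dq.length + 25 ≤ f + V₀.card + tr.length →
      ∃ Δ, (bfs bd f (v, dq, tr)).2 = tr ++ Δ ∧
        BfsInv b V₀ s (bfs bd f (v, dq, tr)).1 [] (tr ++ Δ) := by
  intro f
  induction f with
  | zero =>
    intro v dq tr hinv hf
    have hcb := card_bound hctx.1 hinv
    have : dq.length = 0 := by omega
    rw [List.length_eq_zero_iff] at this
    subst this
    exact ⟨[], by simp [bfs], by simpa [bfs] using hinv⟩
  | succ f ih =>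
    intro v dq tr hinv hf
    match dq with
    | [] => exact ⟨[], by simp [bfs], by simpa [bfs] using hinv⟩
    | cur :: rest =>
      have hcur : cur ∈ tr := hinv.2.2.2.2.2.1 cur (List.mem_cons.mpr (Or.inl rfl))
      obtain ⟨Δ₁, e1, e2, hinv1, hdirs⟩ :=
        fold_dirStep_spec hctx dirsA (fun x hx => hx) v rest tr hcur hinv
      set st := dirsA.foldl (dirStep bd cur) (v, rest, tr) with hstdef
      have hpop : BfsInv b V₀ s st.1 (rest ++ Δ₁) (tr ++ Δ₁) := by
        obtain ⟨hsh, hndtr, hnddq, hgtr, hdisj, hdqtr, hvchar, hreach, hstr, hclosed⟩ := hinv1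
        refine ⟨hsh, hndtr, (List.nodup_cons.mp hnddq).2, hgtr, hdisj, ?_, hvchar, hreach, hstr, ?_⟩
        · exact fun p hp => hdqtr p (List.mem_cons.mpr (Or.inr hp))
        · intro p hp hpdq q hq
          by_cases hpc : p = cur
          · subst hpc
            obtain ⟨-, -, ⟨d, hd, hqeq⟩, -⟩ := id hq
            subst hqeq
            exact hdirs d hd hq
          · exact hclosed p hp (by
              intro hmem
              rcases List.mem_cons.mp hmem with h | h
              · exact hpc h
              · exact hpdq h) q hq
      have hst : st = (st.1, rest ++ Δ₁, tr ++ Δ₁) := by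
        rw [← e1, ← e2]
      have hbfs : bfs bd (f + 1) (v, cur :: rest, tr) = bfs bd f st := by
        simp only [bfs]
        rw [hstdef]
      obtain ⟨Δ₂, e3, hinv2⟩ := ih st.1 (rest ++ Δ₁) (tr ++ Δ₁) hpop (by
        simp only [List.length_append]
        have : (cur :: rest).length = rest.length + 1 := rfl
        omega)
      rw [hbfs, hst]
      refine ⟨Δ₁ ++ Δ₂, ?_, ?_⟩
      · rw [e3, List.append_assoc]
      · rw [← List.append_assoc]
        exact hinv2

-- ---------- outer loop ----------
def visited (b : List (List Int)) (P : Finset (Int × Int)) : Finset (Int × Int) :=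
  grid.filter fun p => ∃ d ∈ P, p ∈ compB b d

lemma mem_visited {b : List (List Int)} {P : Finset (Int × Int)} (hP : P ⊆ grid)
    {p : Int × Int} : p ∈ visited b P ↔ p ∈ grid ∧ ∃ d ∈ P, Reach b d p := by
  simp only [visited, Finset.mem_filter]
  constructor
  · rintro ⟨hg, d, hd, hm⟩
    exact ⟨hg, d, hd, ((compB_spec (hP hd)).2 p).mp hm⟩
  · rintro ⟨hg, d, hd, hm⟩
    exact ⟨hg, d, hd, ((compB_spec (hP hd)).2 p).mpr hm⟩

def OutInv (b : List (List Int)) (P : Finset (Int × Int))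
    (st : List (List Bool) × Int × List (List Int)) : Prop :=
  vshape st.1 ∧ (∀ p ∈ grid, (vget st.1 p.1 p.2 = true ↔ p ∈ visited b P)) ∧
    st.2.1 = (((visited b P).filter fun p => 3 ≤ (compB b p).length).card : Int) ∧
    (∀ p ∈ grid, p ∉ visited b P → bget st.2.2 p.1 p.2 = bget b p.1 p.2)

lemma bget_foldl_bset {x : Int × Int} (hxg : x ∈ grid) :
    ∀ (l : List (Int × Int)) (bd : List (List Int)), (∀ t ∈ l, t ∈ grid) → x ∉ l →
      bget (l.foldl (fun bd t => bset bd t.1 t.2 0) bd) x.1 x.2 = bget bd x.1 x.2 := by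
  intro l
  induction l with
  | nil => intro bd _ _; rfl
  | cons t l ih =>
    intro bd hg hx
    rw [List.foldl_cons, ih _ (fun u hu => hg u (List.mem_cons.mpr (Or.inr hu)))
      (fun hmem => hx (List.mem_cons.mpr (Or.inr hmem)))]
    exact bget_bset_ne (hg t (List.mem_cons.mpr (Or.inl rfl))) hxg
      (fun he => hx (List.mem_cons.mpr (Or.inl he))) 0

lemma processCell_spec {b : List (List Int)} {P : Finset (Int × Int)}
    {st : List (List Bool) × Int × List (List Int)} {p : Int × Int} (hp : p ∈ grid)
    (hP : P ⊆ grid) (h : OutInv b P st) : OutInv b (insert p P) (processCell st p.1 p.2) := by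
  obtain ⟨hsh, hvchar, hscore, hagree⟩ := h
  have hPg : insert p P ⊆ grid := Finset.insert_subset hp hP
  by_cases hv : vget st.1 p.1 p.2 = false
  · -- p not yet visited: one BFS runs
    have hpV₀ : p ∉ visited b P := by
      intro hmem
      rw [(hvchar p hp).mpr hmem] at hv
      simp at hv
    have hctx : BfsCtx b st.2.2 (visited b P) := by
      refine ⟨Finset.filter_subset _ _, hagree, ?_⟩
      intro x hx q hq
      obtain ⟨hxg, d, hd, hr⟩ := (mem_visited hP).mp hx
      exact (mem_visited hP).mpr ⟨hq.2.1, d, hd, hr.tail hq⟩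
    have hinv0 : BfsInv b (visited b P) p (vset st.1 p.1 p.2 true) [p] [p] := by
      refine ⟨vshape_vset hsh _ _ _, List.nodup_singleton p, List.nodup_singleton p,
        ?_, ?_, fun x hx => hx, ?_, ?_, List.mem_singleton.mpr rfl, ?_⟩
      · intro x hx; rw [List.mem_singleton] at hx; exact hx ▸ hp
      · intro x hx; rw [List.mem_singleton] at hx; exact hx ▸ hpV₀
      · intro x hxg
        by_cases hxp : x = p
        · subst hxp
          rw [vget_vset_self hsh hp]
          simp
        · rw [vget_vset_ne hp hxg hxp, hvchar x hxg]
          simp only [List.mem_singleton]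
          constructor
          · exact fun h => Or.inl h
          · rintro (h | h)
            · exact h
            · exact absurd h hxp
      · intro x hx; rw [List.mem_singleton] at hx; subst hx; exact Relation.ReflTransGen.refl
      · intro x hx hnx; exact absurd hx hnx
    obtain ⟨Δ, etr, hfin⟩ := bfs_spec hctx 32 (vset st.1 p.1 p.2 true) [p] [p] hinv0
      (by simp; omega)
    obtain ⟨hsh', hnd', -, hg', hdisj', -, hvchar', hreach', hpmem', hclosed'⟩ := hfin
    have htr2 : ∀ q, Reach b p q → q ∈ [p] ++ Δ := by
      intro q hr
      induction hr with
      | refl => exact hpmem'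
      | tail _ h2 ih => exact hclosed' _ ih (by simp) _ h2
    have htr_iff : ∀ q, q ∈ [p] ++ Δ ↔ Reach b p q :=
      fun q => ⟨fun hq => hreach' q hq, htr2 q⟩
    have hcomp := compB_spec (b := b) hp
    have hperm : List.Perm ([p] ++ Δ) (compB b p) := by
      rw [List.perm_ext_iff_of_nodup hnd' hcomp.1]
      intro a
      rw [htr_iff, hcomp.2]
    have hlen : ([p] ++ Δ).length = (compB b p).length := hperm.length_eq
    have hVins : visited b (insert p P) = visited b P ∪ ([p] ++ Δ).toFinset := by
      ext x
      rw [mem_visited hPg, Finset.mem_union, List.mem_toFinset]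
      constructor
      · rintro ⟨hxg, d, hd, hr⟩
        rcases Finset.mem_insert.mp hd with rfl | hd'
        · exact Or.inr (htr2 x hr)
        · exact Or.inl ((mem_visited hP).mpr ⟨hxg, d, hd', hr⟩)
      · rintro (hx | hx)
        · obtain ⟨hxg, d, hd, hr⟩ := (mem_visited hP).mp hx
          exact ⟨hxg, d, Finset.mem_insert.mpr (Or.inr hd), hr⟩
        · exact ⟨hg' x hx, p, Finset.mem_insert_self p P, hreach' x hx⟩
    have hsize : ∀ q ∈ [p] ++ Δ, (compB b q).length = ([p] ++ Δ).length := by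
      intro q hq
      rw [hlen]
      exact compB_length_eq hp (hreach' q hq)
    have hdisjF : Disjoint (visited b P) (([p] ++ Δ).toFinset) := by
      rw [Finset.disjoint_right]
      intro a ha
      exact hdisj' a (List.mem_toFinset.mp ha)
    have hproc : processCell st p.1 p.2 =
        if 3 ≤ (bfs st.2.2 32 (vset st.1 p.1 p.2 true, [p], [p])).2.length then
          ((bfs st.2.2 32 (vset st.1 p.1 p.2 true, [p], [p])).1,
            st.2.1 + ((bfs st.2.2 32 (vset st.1 p.1 p.2 true, [p], [p])).2.length : Int),
            (bfs st.2.2 32 (vset st.1 p.1 p.2 true, [p], [p])).2.foldl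
              (fun bd t => bset bd t.1 t.2 0) st.2.2)
        else ((bfs st.2.2 32 (vset st.1 p.1 p.2 true, [p], [p])).1, st.2.1, st.2.2) := by
      simp only [processCell]
      rw [if_pos hv]
    have hcardsplit : ((visited b (insert p P)).filter fun q => 3 ≤ (compB b q).length).card =
        ((visited b P).filter fun q => 3 ≤ (compB b q).length).card +
          ((([p] ++ Δ).toFinset).filter fun q => 3 ≤ (compB b q).length).card := by
      rw [hVins, Finset.filter_union,
        Finset.card_union_of_disjoint (Finset.disjoint_filter_filter hdisjF)]
    have hvchar'' : ∀ x ∈ grid,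
        (vget (bfs st.2.2 32 (vset st.1 p.1 p.2 true, [p], [p])).1 x.1 x.2 = true ↔
          x ∈ visited b (insert p P)) := by
      intro x hxg
      rw [hvchar' x hxg, hVins, Finset.mem_union, List.mem_toFinset]
    by_cases hbig : 3 ≤ ((bfs st.2.2 32 (vset st.1 p.1 p.2 true, [p], [p])).2).length
    · rw [hproc, if_pos hbig]
      rw [etr] at hbig
      have hfeq : (([p] ++ Δ).toFinset).filter (fun q => 3 ≤ (compB b q).length) =
          ([p] ++ Δ).toFinset := by
        apply Finset.filter_eq_self.mpr
        intro q hq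
        rw [hsize q (List.mem_toFinset.mp hq)]
        exact hbig
      refine ⟨hsh', hvchar'', ?_, ?_⟩
      · show st.2.1 + _ = _
        rw [hcardsplit, hfeq, List.toFinset_card_of_nodup hnd', hscore, etr]
        push_cast
        ring
      · intro x hxg hxnot
        show bget (List.foldl _ st.2.2 _) x.1 x.2 = _
        rw [hVins, Finset.mem_union, List.mem_toFinset] at hxnot
        rw [etr, bget_foldl_bset hxg ([p] ++ Δ) st.2.2 hg'
          (fun hmem => hxnot (Or.inr hmem))]
        exact hagree x hxg (fun hmem => hxnot (Or.inl hmem))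
    · rw [hproc, if_neg hbig]
      rw [etr] at hbig
      have hfeq : (([p] ++ Δ).toFinset).filter (fun q => 3 ≤ (compB b q).length) = ∅ := by
        apply Finset.filter_eq_empty_iff.mpr
        intro q hq
        rw [hsize q (List.mem_toFinset.mp hq)]
        omega
      refine ⟨hsh', hvchar'', ?_, ?_⟩
      · show st.2.1 = _
        rw [hcardsplit, hfeq, hscore]
        simp
      · intro x hxg hxnot
        show bget st.2.2 x.1 x.2 = _
        rw [hVins, Finset.mem_union] at hxnot
        exact hagree x hxg (fun hmem => hxnot (Or.inl hmem))
  · -- p was already visited: nothing happens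
    have hvis : p ∈ visited b P := by
      have hb : vget st.1 p.1 p.2 = true := by
        rcases Bool.eq_false_or_eq_true (vget st.1 p.1 p.2) with hb | hb
        · exact hb
        · exact absurd hb hv
      exact (hvchar p hp).mp hb
    have hsame : visited b (insert p P) = visited b P := by
      ext x
      rw [mem_visited hPg, mem_visited hP]
      constructor
      · rintro ⟨hxg, d, hd, hr⟩
        rcases Finset.mem_insert.mp hd with rfl | hd'
        · obtain ⟨-, d₀, hd₀, hr₀⟩ := (mem_visited hP).mp hvis
          exact ⟨hxg, d₀, hd₀, hr₀.trans hr⟩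
        · exact ⟨hxg, d, hd', hr⟩
      · rintro ⟨hxg, d, hd, hr⟩
        exact ⟨hxg, d, Finset.mem_insert.mpr (Or.inr hd), hr⟩
    have hproc : processCell st p.1 p.2 = st := by
      simp only [processCell]
      rw [if_neg hv]
    rw [hproc, OutInv, hsame]
    exact ⟨hsh, hvchar, hscore, hagree⟩

lemma foldl_processCell_spec {b : List (List Int)} :
    ∀ (l : List (Int × Int)) (P : Finset (Int × Int))
      (st : List (List Bool) × Int × List (List Int)), (∀ p ∈ l, p ∈ grid) → P ⊆ grid →
      OutInv b P st →
      OutInv b (P ∪ l.toFinset) (l.foldl (fun st p => processCell st p.1 p.2) st) := by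
  intro l
  induction l with
  | nil => intro P st _ _ h; simpa using h
  | cons p tl ih =>
    intro P st hl hP h
    have h1 := processCell_spec (hl p (by simp)) hP h
    have h2 := ih (insert p P) _ (fun q hq => hl q (by simp [hq]))
      (Finset.insert_subset (hl p (by simp)) hP) h1
    have : insert p P ∪ tl.toFinset = P ∪ (p :: tl).toFinset := by
      ext x; simp
    rw [this] at h2
    exact h2

lemma cells5_grid : ∀ p ∈ cells5, p ∈ grid := by decide

lemma cells5_nodup : cells5.Nodup := by decide

lemma cells5_toFinset : cells5.toFinset = grid := by decide

lemma visited_empty (b : List (List Int)) : visited b ∅ = ∅ := by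
  simp [visited]

lemma visited_grid (b : List (List Int)) : visited b grid = grid := by
  ext x
  rw [mem_visited (fun y hy => hy)]
  constructor
  · exact fun h => h.1
  · exact fun hx => ⟨hx, x, hx, Relation.ReflTransGen.refl⟩

lemma pv_foldl_flatMap {α β σ : Type} (l : List α) (g : α → List β) (F : σ → β → σ) :
    ∀ (init : σ), (l.flatMap g).foldl F init = l.foldl (fun st a => (g a).foldl F st) init := by
  induction l with
  | nil => intro init; rfl
  | cons a l ih =>
    intro init
    rw [List.flatMap_cons, List.foldl_append, List.foldl_cons, ih]

lemma cal_score_eq (b : List (List Int)) :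
    cal_score b = ((grid.filter fun p => 3 ≤ (compB b p).length).card : Int) := by
  have hfold : cal_score b = (cells5.foldl (fun st p => processCell st p.1 p.2)
      (List.replicate 5 (List.replicate 5 false), (0 : Int), b)).2.1 := by
    rw [cal_score, cells5, pv_foldl_flatMap]
    simp only [List.foldl_map]
  have hinit : OutInv b ∅ (List.replicate 5 (List.replicate 5 false), (0 : Int), b) := by
    refine ⟨⟨by simp, ?_⟩, ?_, ?_, ?_⟩
    · intro r hr
      rw [List.eq_of_mem_replicate hr]
      simp
    · intro p _
      rw [vget_replicate, visited_empty]
      simp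
    · rw [visited_empty]
      simp
    · exact fun p _ _ => rfl
  have h := foldl_processCell_spec cells5 ∅ _ cells5_grid (Finset.empty_subset _) hinit
  rw [cells5_toFinset, Finset.empty_union] at h
  have hs := h.2.2.1
  rw [visited_grid] at hs
  rw [hfold, hs]

lemma alt_eq (b : List (List Int)) :
    cal_score_alt b = ((grid.filter fun p => 3 ≤ (compB b p).length).card : Int) := by
  have h0 : cal_score_alt b =
      ((cells5.filter fun p => decide (3 ≤ (compB b p).length)).length : Int) := rfl
  have hnd : (cells5.filter fun p => decide (3 ≤ (compB b p).length)).Nodup :=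
    cells5_nodup.filter _
  have hfs : (cells5.filter fun p => decide (3 ≤ (compB b p).length)).toFinset =
      grid.filter fun p => 3 ≤ (compB b p).length := by
    ext x
    rw [List.mem_toFinset, List.mem_filter, Finset.mem_filter, ← cells5_toFinset,
      List.mem_toFinset]
    simp
  rw [h0, ← List.toFinset_card_of_nodup hnd, hfs]

-- ===== VERDICT (by name: the statement is the Claim_ definition above) =====
theorem cal_score_spec : Claim_equal_cal_score := by
  intro board _ _
  unfold Spec_cal_score
  rw [cal_score_eq, alt_eq]
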